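-- pv_equiv track=rewrite | github.com/yonsweng/ps | codeforces/1906/e.py | answer
-- ===== SOURCE A (Python) =====
-- def answer(n, c):
--     groups = []
--     stack = []
--     max_c = max(c)
--     for s in range(2 * n - 1, -1, -1):
--         stack.append(c[s])
--         if c[s] == max_c:
--             group = []
--             while stack:
--                 group.append(stack.pop())
--             groups.append(group)
--             if s > 0:
--                 max_c = max(c[:s])
--     groups.reverse()
--     cnts = [len(group) for group in groups]
--
--     # split cnts into two groups with equal sum
--     selected = set()
--     dp = {}
--
--     def dfs(i, remaining):
--         if (i, remaining) in dp:
--             return dp[(i, remaining)]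
--         if i == len(cnts):
--             return remaining == 0
--         if dfs(i + 1, remaining):
--             dp[(i, remaining)] = True
--             return True
--         if remaining >= cnts[i] and dfs(i + 1, remaining - cnts[i]):
--             selected.add(i)
--             dp[(i, remaining)] = True
--             return True
--         dp[(i, remaining)] = False
--         return False
--
--     if not dfs(0, n):
--         return [], []
--
--     a, b = [], []
--     for i in range(len(cnts)):
--         if i in selected:
--             a.extend(groups[i])
--         else:
--             b.extend(groups[i])
--
--     return a, b
-- ===== SOURCE B (Python) =====
-- def answer(n, c):
--     # Grouping pass (same as the original): cut at each running prefix maximum.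
--     groups = []
--     stack = []
--     max_c = max(c)
--     for s in range(2 * n - 1, -1, -1):
--         stack.append(c[s])
--         if c[s] == max_c:
--             group = []
--             while stack:
--                 group.append(stack.pop())
--             groups.append(group)
--             if s > 0:
--                 max_c = max(c[:s])
--     groups.reverse()
--     cnts = [len(group) for group in groups]
--     m = len(cnts)
--
--     # Bottom-up subset-sum table: reach[i][r] == some subset of cnts[i:] sums to r.
--     if n < 0:
--         return [], []
--     reach = [[False] * (n + 1) for _ in range(m + 1)]
--     reach[m][0] = True
--     for i in range(m - 1, -1, -1):
--         nxt = reach[i + 1]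
--         row = reach[i]
--         for r in range(n + 1):
--             row[r] = nxt[r] or (r >= cnts[i] and nxt[r - cnts[i]])
--     if not reach[0][n]:
--         return [], []
--
--     # Reconstruct, preferring to skip a group (matches the recursion's skip-first order).
--     a, b = [], []
--     r = n
--     for i in range(m):
--         if reach[i + 1][r]:
--             b.extend(groups[i])
--         else:
--             a.extend(groups[i])
--             r -= cnts[i]
--     return a, b
-- ===== Notes on version B (the rewrite author's own statement) =====
-- stated objective: alternative
-- what changed: The memoized recursive subset-sum search with a side-effecting 'selected' set is replaced by an iterative bottom-up boolean reachability table over group suffixes plus a skip-first path reconstruction; the grouping pass is kept.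
import Mathlib
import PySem

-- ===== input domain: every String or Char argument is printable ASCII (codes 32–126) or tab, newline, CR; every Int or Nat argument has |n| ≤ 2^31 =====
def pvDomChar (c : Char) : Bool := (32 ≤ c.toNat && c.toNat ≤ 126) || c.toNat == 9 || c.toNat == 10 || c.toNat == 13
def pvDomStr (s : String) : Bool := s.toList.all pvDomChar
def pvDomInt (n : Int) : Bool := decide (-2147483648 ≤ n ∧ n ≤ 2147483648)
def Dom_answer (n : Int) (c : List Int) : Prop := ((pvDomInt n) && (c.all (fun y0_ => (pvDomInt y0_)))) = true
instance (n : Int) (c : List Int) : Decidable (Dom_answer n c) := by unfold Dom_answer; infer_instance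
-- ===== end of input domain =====

-- B replaces A's memoized recursive subset-sum search (with its side-effecting 'selected'
-- set) by an iterative bottom-up reachability table plus a skip-first path reconstruction;
-- the grouping pass is kept verbatim, so both ports share the grouping helper pvMkGroups.

-- ===== PORT A =====
-- shared grouping pass (identical Python code in A and B): cut the reversed scan of
-- c[0:2n] at every running prefix maximum
def pvGroupStep (c : List Int) (st : List (List Int) × List Int × Int) (s : Int) :
    List (List Int) × List Int × Int :=
  let stack := st.2.1 ++ [PySem.List.pyGetD c s 0]        -- stack.append(c[s])
  if PySem.List.pyGetD c s 0 == st.2.2 then               -- if c[s] == max_c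
    let group := stack.reverse                            -- while stack: group.append(stack.pop())
    let max_c := if s > 0 then
        (PySem.List.max? (PySem.List.slice c (some 0) (some s)) (fun x => x)).getD st.2.2
      else st.2.2                                         -- if s > 0: max_c = max(c[:s])
    (st.1 ++ [group], [], max_c)                          -- groups.append(group)
  else (st.1, stack, st.2.2)

def pvMkGroups (n : Int) (c : List Int) : List (List Int) :=
  (((PySem.List.pyRange (2 * n - 1) (-1) (-1)).foldl (pvGroupStep c)
      ([], [], (PySem.List.max? c (fun x => x)).getD 0)).1).reverse  -- groups.reverse()

-- the memoized dfs; 'rest' is the remaining suffix cnts[i:] (so cnts[i] is its head),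
-- which makes the recursion on increasing i the obvious structural recursion
def pvDfs (rest : List Int) (i : Nat) (r : Int)
    (dp : PySem.Dict (Nat × Int) Bool) (sel : PySem.Set Nat) :
    Bool × PySem.Dict (Nat × Int) Bool × PySem.Set Nat :=
  match PySem.Dict.get? dp (i, r) with
  | some v => (v, dp, sel)                                -- if (i, remaining) in dp: return dp[...]
  | none =>
    match rest with
    | [] => ((r == 0), dp, sel)                           -- if i == len(cnts): return remaining == 0
    | ci :: rest' =>
      let t1 := pvDfs rest' (i + 1) r dp sel              -- dfs(i + 1, remaining)
      if t1.1 then (true, PySem.Dict.insert t1.2.1 (i, r) true, t1.2.2)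
      else if decide (ci ≤ r) then                        -- remaining >= cnts[i]
        let t2 := pvDfs rest' (i + 1) (r - ci) t1.2.1 t1.2.2
        if t2.1 then (true, PySem.Dict.insert t2.2.1 (i, r) true, PySem.Set.add t2.2.2 i)
        else (false, PySem.Dict.insert t2.2.1 (i, r) false, t2.2.2)
      else (false, PySem.Dict.insert t1.2.1 (i, r) false, t1.2.2)

def answer (n : Int) (c : List Int) : List Int × List Int :=
  let groups := pvMkGroups n c
  let cnts := groups.map (fun g => (g.length : Int))
  let t := pvDfs cnts 0 n PySem.Dict.empty PySem.Set.empty   -- dfs(0, n)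
  if t.1 then
    (List.range cnts.length).foldl (fun ab i =>           -- for i in range(len(cnts)):
      if PySem.Set.contains t.2.2 i then (ab.1 ++ groups.getD i [], ab.2)
      else (ab.1, ab.2 ++ groups.getD i [])) ([], [])
  else ([], [])                                           -- if not dfs(0, n): return [], []

-- ===== PORT B =====
-- reach[i][r] == "some subset of cnts[i:] sums to r"; one row from the next row
def pvRow (ci : Int) (nxt : List Bool) (N : Nat) : List Bool :=
  (List.range (N + 1)).map (fun r =>
    nxt.getD r false || (decide (ci ≤ (r : Int)) && nxt.getD ((r : Int) - ci).toNat false))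

def pvLastRow (N : Nat) : List Bool := true :: List.replicate N false  -- reach[m][0] = True

-- rows built from the last one backwards (Source B fills the table for i = m-1 .. 0)
def pvReach (cnts : List Int) (N : Nat) : List (List Bool) :=
  cnts.foldr (fun ci tbl => pvRow ci (tbl.headD []) N :: tbl) [pvLastRow N]

def answer_alt (n : Int) (c : List Int) : List Int × List Int :=
  let groups := pvMkGroups n c
  let cnts := groups.map (fun g => (g.length : Int))
  if n < 0 then ([], [])
  else
    let reach := pvReach cnts n.toNat
    if (reach.getD 0 []).getD n.toNat false then          -- if not reach[0][n]: return [], []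
      ((List.range cnts.length).foldl (fun (st : (List Int × List Int) × Int) i =>
        if (reach.getD (i + 1) []).getD st.2.toNat false then   -- if reach[i+1][r]: b.extend
          ((st.1.1, st.1.2 ++ groups.getD i []), st.2)
        else ((st.1.1 ++ groups.getD i [], st.1.2), st.2 - cnts.getD i 0))
        (([], []), n)).1
    else ([], [])

-- ===== PRECONDITION & SPEC =====
-- Pre_ excludes exactly the inputs where A raises: max(c) raises ValueError on c = [],
-- and c[s] raises IndexError when n ≥ 1 and len(c) < 2n.
def Pre_answer (n : Int) (c : List Int) : Prop :=
  c ≠ [] ∧ (n ≤ 0 ∨ 2 * n ≤ (c.length : Int))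
instance (n : Int) (c : List Int) : Decidable (Pre_answer n c) := by
  unfold Pre_answer; infer_instance
def pvWitness_answer : Int × List Int := (2, [3, 1, 2, 2])

def Spec_answer (n : Int) (c : List Int) (out : List Int × List Int) : Prop := out = answer_alt n c
instance (n : Int) (c : List Int) (out : List Int × List Int) : Decidable (Spec_answer n c out) := by unfold Spec_answer; infer_instance

-- ===== CLAIM (what is proved, stated in full; the proofs are below) =====
def Claim_equal_answer : Prop := ∀ (n : Int) (c : List Int), Dom_answer n c → Pre_answer n c → Spec_answer n c (answer n c)

-- ===== LEMMAS AND PROOFS =====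

-- pure specification of the subset-sum search on a suffix of cnts
def reachF : List Int → Int → Bool
  | [], r => r == 0
  | ci :: l, r => reachF l r || (decide (ci ≤ r) && reachF l (r - ci))

-- the indices taken by the skip-first path from (i, r)
def pathT : List Int → Nat → Int → List Nat
  | [], _, _ => []
  | ci :: l, i, r => if reachF l r then pathT l (i + 1) r else i :: pathT l (i + 1) (r - ci)

-- the common value both final loops compute
def pvAsm : List (List Int) → Int → (List Int × List Int) → List Int × List Int
  | [], _, ab => ab
  | g :: gs, r, ab =>
    if reachF (gs.map (fun x => (x.length : Int))) r then pvAsm gs r (ab.1, ab.2 ++ g)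
    else pvAsm gs (r - g.length) (ab.1 ++ g, ab.2)

def DPok (cnts : List Int) (dp : PySem.Dict (Nat × Int) Bool) : Prop :=
  ∀ i r v, PySem.Dict.get? dp (i, r) = some v → v = reachF (cnts.drop i) r

def SELok (cnts : List Int) (dp : PySem.Dict (Nat × Int) Bool) (sel : PySem.Set Nat) : Prop :=
  ∀ i r, PySem.Dict.get? dp (i, r) = some true →
    ∀ k, k ∈ pathT (cnts.drop i) i r → k ∈ sel

lemma pathT_ge (l : List Int) : ∀ (i : Nat) (r : Int) (k : Nat), k ∈ pathT l i r → i ≤ k := by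
  induction l with
  | nil => intro i r k h; simp [pathT] at h
  | cons ci l ih =>
    intro i r k h
    by_cases hr : reachF l r
    · simp [pathT, hr] at h; exact le_trans (Nat.le_succ i) (ih _ _ _ h)
    · simp [pathT, hr] at h
      rcases h with h | h
      · omega
      · exact le_trans (Nat.le_succ i) (ih _ _ _ h)

lemma pvDfs_memo (rest : List Int) (i : Nat) (r : Int) (dp : PySem.Dict (Nat × Int) Bool)
    (sel : PySem.Set Nat) (v : Bool) (hget : PySem.Dict.get? dp (i, r) = some v) :
    pvDfs rest i r dp sel = (v, dp, sel) := by
  rw [pvDfs.eq_def, hget]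

lemma pvDfs_nil (i : Nat) (r : Int) (dp : PySem.Dict (Nat × Int) Bool) (sel : PySem.Set Nat)
    (hget : PySem.Dict.get? dp (i, r) = none) :
    pvDfs [] i r dp sel = ((r == 0), dp, sel) := by
  rw [pvDfs.eq_def, hget]

lemma pvDfs_cons (ci : Int) (rest' : List Int) (i : Nat) (r : Int)
    (dp : PySem.Dict (Nat × Int) Bool) (sel : PySem.Set Nat)
    (hget : PySem.Dict.get? dp (i, r) = none) :
    pvDfs (ci :: rest') i r dp sel =
    (fun t1 : Bool × PySem.Dict (Nat × Int) Bool × PySem.Set Nat =>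
      if t1.1 then (true, PySem.Dict.insert t1.2.1 (i, r) true, t1.2.2)
      else if decide (ci ≤ r) then
        (fun t2 : Bool × PySem.Dict (Nat × Int) Bool × PySem.Set Nat =>
          if t2.1 then (true, PySem.Dict.insert t2.2.1 (i, r) true, PySem.Set.add t2.2.2 i)
          else (false, PySem.Dict.insert t2.2.1 (i, r) false, t2.2.2))
          (pvDfs rest' (i + 1) (r - ci) t1.2.1 t1.2.2)
      else (false, PySem.Dict.insert t1.2.1 (i, r) false, t1.2.2))
      (pvDfs rest' (i + 1) r dp sel) := by
  rw [pvDfs.eq_def, hget]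

lemma dfs_spec (cnts : List Int) (rest : List Int) : ∀ (i : Nat) (r : Int)
    (dp : PySem.Dict (Nat × Int) Bool) (sel : PySem.Set Nat),
    rest = cnts.drop i → DPok cnts dp → SELok cnts dp sel →
    (pvDfs rest i r dp sel).1 = reachF rest r ∧
    DPok cnts (pvDfs rest i r dp sel).2.1 ∧
    SELok cnts (pvDfs rest i r dp sel).2.1 (pvDfs rest i r dp sel).2.2 ∧
    (∀ k, k ∈ (pvDfs rest i r dp sel).2.2 ↔
      (k ∈ sel ∨ ((pvDfs rest i r dp sel).1 = true ∧ k ∈ pathT rest i r))) := by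
  induction rest with
  | nil =>
    intro i r dp sel hrest hdp hsel
    cases hget : PySem.Dict.get? dp (i, r) with
    | some v =>
      rw [pvDfs_memo [] i r dp sel v hget]
      have hv : v = reachF ([] : List Int) r := by
        have := hdp i r v hget; rwa [← hrest] at this
      dsimp only
      refine ⟨hv, hdp, hsel, fun k => ?_⟩
      simp [pathT]
    | none =>
      rw [pvDfs_nil i r dp sel hget]
      refine ⟨rfl, hdp, hsel, fun k => ?_⟩
      simp [pathT]
  | cons ci rest' ih =>
    intro i r dp sel hrest hdp hsel
    have hrest' : rest' = cnts.drop (i + 1) := by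
      rw [← List.tail_drop, ← hrest]; rfl
    cases hget : PySem.Dict.get? dp (i, r) with
    | some v =>
      rw [pvDfs_memo _ i r dp sel v hget]
      have hv : v = reachF (ci :: rest') r := by
        have := hdp i r v hget; rwa [← hrest] at this
      dsimp only
      refine ⟨hv, hdp, hsel, fun k => ?_⟩
      constructor
      · exact fun h => Or.inl h
      · rintro (h | ⟨hT, hp⟩)
        · exact h
        · refine hsel i r ?_ k ?_
          · rw [hget, hT]
          · rwa [← hrest]
    | none =>
      rcases ht1 : pvDfs rest' (i + 1) r dp sel with ⟨b1, dps1⟩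
      rcases dps1 with ⟨dp1, sel1⟩
      obtain ⟨h1b, h1dp, h1sel, h1mem⟩ := ih (i + 1) r dp sel hrest' hdp hsel
      rw [ht1] at h1b h1dp h1sel h1mem
      dsimp only at h1b h1dp h1sel h1mem
      rw [pvDfs_cons ci rest' i r dp sel hget, ht1]
      dsimp only
      cases b1 with
      | true =>
        simp only [if_true]
        have hreach : reachF (ci :: rest') r = true := by
          simp [reachF, ← h1b]
        have hpath : pathT (ci :: rest') i r = pathT rest' (i + 1) r := by
          simp [pathT, ← h1b]
        refine ⟨hreach.symm, ?_, ?_, ?_⟩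
        · intro j ρ v hjv
          by_cases hkey : (j, ρ) = (i, r)
          · rw [hkey, PySem.Dict.get?_insert_self] at hjv
            cases hjv
            rw [(Prod.mk.injEq .. ).mp hkey |>.1, (Prod.mk.injEq .. ).mp hkey |>.2,
              ← hrest, hreach]
          · rw [PySem.Dict.get?_insert_of_ne _ _ hkey] at hjv
            exact h1dp j ρ v hjv
        · intro j ρ hjv k hk
          by_cases hkey : (j, ρ) = (i, r)
          · have hji : j = i := ((Prod.mk.injEq .. ).mp hkey).1
            have hρr : ρ = r := ((Prod.mk.injEq .. ).mp hkey).2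
            rw [hji, hρr, ← hrest, hpath] at hk
            exact (h1mem k).mpr (Or.inr ⟨by trivial, hk⟩)
          · rw [PySem.Dict.get?_insert_of_ne _ _ hkey] at hjv
            exact h1sel j ρ hjv k hk
        · intro k
          rw [hpath]
          rw [h1mem k]
          simp
      | false =>
        simp only [Bool.false_eq_true, if_false]
        have hskip : reachF rest' r = false := h1b.symm
        have h1mem' : ∀ k, k ∈ sel1 ↔ k ∈ sel := by
          intro k; rw [h1mem k]; simp
        by_cases hci : ci ≤ r
        · simp only [hci, decide_true, if_true]
          rcases ht2 : pvDfs rest' (i + 1) (r - ci) dp1 sel1 with ⟨b2, dps2⟩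
          rcases dps2 with ⟨dp2, sel2⟩
          obtain ⟨h2b, h2dp, h2sel, h2mem⟩ := ih (i + 1) (r - ci) dp1 sel1 hrest' h1dp h1sel
          rw [ht2] at h2b h2dp h2sel h2mem
          dsimp only at h2b h2dp h2sel h2mem
          have hpath : pathT (ci :: rest') i r = i :: pathT rest' (i + 1) (r - ci) := by
            simp [pathT, hskip]
          cases b2 with
          | true =>
            simp only [if_true]
            have hreach : reachF (ci :: rest') r = true := by
              simp [reachF, hskip, ← h2b, hci]
            refine ⟨hreach.symm, ?_, ?_, ?_⟩
            · intro j ρ v hjv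
              by_cases hkey : (j, ρ) = (i, r)
              · rw [hkey, PySem.Dict.get?_insert_self] at hjv
                cases hjv
                rw [(Prod.mk.injEq .. ).mp hkey |>.1, (Prod.mk.injEq .. ).mp hkey |>.2,
                  ← hrest, hreach]
              · rw [PySem.Dict.get?_insert_of_ne _ _ hkey] at hjv
                exact h2dp j ρ v hjv
            · intro j ρ hjv k hk
              by_cases hkey : (j, ρ) = (i, r)
              · have hji : j = i := ((Prod.mk.injEq .. ).mp hkey).1
                have hρr : ρ = r := ((Prod.mk.injEq .. ).mp hkey).2
                rw [hji, hρr, ← hrest, hpath] at hk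
                rcases List.mem_cons.mp hk with hk | hk
                · rw [PySem.Set.mem_add]; exact Or.inr hk
                · rw [PySem.Set.mem_add]
                  exact Or.inl ((h2mem k).mpr (Or.inr ⟨by trivial, hk⟩))
              · rw [PySem.Dict.get?_insert_of_ne _ _ hkey] at hjv
                rw [PySem.Set.mem_add]
                exact Or.inl (h2sel j ρ hjv k hk)
            · intro k
              rw [PySem.Set.mem_add, hpath]
              rw [h2mem k, List.mem_cons]
              constructor
              · rintro ((hk | ⟨-, hk⟩) | hk)
                · exact Or.inl ((h1mem' k).mp hk)
                · exact Or.inr ⟨by trivial, Or.inr hk⟩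
                · exact Or.inr ⟨by trivial, Or.inl hk⟩
              · rintro (hk | ⟨-, (hk | hk)⟩)
                · exact Or.inl (Or.inl ((h1mem' k).mpr hk))
                · exact Or.inr hk
                · exact Or.inl (Or.inr ⟨by trivial, hk⟩)
          | false =>
            simp only [Bool.false_eq_true, if_false]
            have hreach : reachF (ci :: rest') r = false := by
              simp [reachF, hskip, ← h2b]
            refine ⟨hreach.symm, ?_, ?_, ?_⟩
            · intro j ρ v hjv
              by_cases hkey : (j, ρ) = (i, r)
              · rw [hkey, PySem.Dict.get?_insert_self] at hjv
                cases hjv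
                rw [(Prod.mk.injEq .. ).mp hkey |>.1, (Prod.mk.injEq .. ).mp hkey |>.2,
                  ← hrest, hreach]
              · rw [PySem.Dict.get?_insert_of_ne _ _ hkey] at hjv
                exact h2dp j ρ v hjv
            · intro j ρ hjv k hk
              by_cases hkey : (j, ρ) = (i, r)
              · rw [hkey, PySem.Dict.get?_insert_self] at hjv
                cases hjv
              · rw [PySem.Dict.get?_insert_of_ne _ _ hkey] at hjv
                exact h2sel j ρ hjv k hk
            · intro k
              rw [h2mem k]
              simp [h1mem' k]
        · simp only [hci, decide_false, Bool.false_eq_true, if_false]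
          have hreach : reachF (ci :: rest') r = false := by
            simp [reachF, hskip, hci]
          refine ⟨hreach.symm, ?_, ?_, ?_⟩
          · intro j ρ v hjv
            by_cases hkey : (j, ρ) = (i, r)
            · rw [hkey, PySem.Dict.get?_insert_self] at hjv
              cases hjv
              rw [(Prod.mk.injEq .. ).mp hkey |>.1, (Prod.mk.injEq .. ).mp hkey |>.2,
                ← hrest, hreach]
            · rw [PySem.Dict.get?_insert_of_ne _ _ hkey] at hjv
              exact h1dp j ρ v hjv
          · intro j ρ hjv k hk
            by_cases hkey : (j, ρ) = (i, r)
            · rw [hkey, PySem.Dict.get?_insert_self] at hjv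
              cases hjv
            · rw [PySem.Dict.get?_insert_of_ne _ _ hkey] at hjv
              exact h1sel j ρ hjv k hk
          · intro k
            rw [h1mem' k]
            simp

lemma dfs_top (cnts : List Int) (n : Int) :
    (pvDfs cnts 0 n PySem.Dict.empty PySem.Set.empty).1 = reachF cnts n ∧
    (∀ k, k ∈ (pvDfs cnts 0 n PySem.Dict.empty PySem.Set.empty).2.2 ↔
      (reachF cnts n = true ∧ k ∈ pathT cnts 0 n)) := by
  have hdp : DPok cnts PySem.Dict.empty := by
    intro i r v h
    simp [PySem.Dict.get?, PySem.Dict.empty] at h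
  have hsel : SELok cnts PySem.Dict.empty PySem.Set.empty := by
    intro i r h
    simp [PySem.Dict.get?, PySem.Dict.empty] at h
  obtain ⟨h1, _, _, h4⟩ := dfs_spec cnts cnts 0 n PySem.Dict.empty PySem.Set.empty (by simp) hdp hsel
  refine ⟨h1, fun k => ?_⟩
  rw [h4 k, ← h1]
  simp [PySem.Set.empty]

lemma reachF_neg (l : List Int) (hpos : ∀ x ∈ l, 0 ≤ x) (r : Int) (hr : r < 0) :
    reachF l r = false := by
  induction l generalizing r with
  | nil => simp [reachF]; omega
  | cons ci l ih =>
    have hci : 0 ≤ ci := hpos ci (by simp)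
    have h1 : reachF l r = false := ih (fun x hx => hpos x (by simp [hx])) r hr
    have h2 : decide (ci ≤ r) = false := by simp; omega
    simp [reachF, h1, h2]

lemma getD_drop {α : Type} (d : α) : ∀ (groups : List α) (i : Nat) (g : α) (t : List α),
    groups.drop i = g :: t → groups.getD i d = g := by
  intro groups
  induction groups with
  | nil => intro i g t h; simp at h
  | cons x xs ih =>
    intro i g t h
    cases i with
    | zero => simp at h; simp [h.1]
    | succ i => simp at h; simpa using ih i g t h

lemma pvReach_headD (l : List Int) (N : Nat) :
    (pvReach l N).headD [] = (pvReach l N).getD 0 [] := by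
  cases l <;> rfl

lemma row_lookup (N : Nat) : ∀ (l : List Int), (∀ x ∈ l, 0 ≤ x) → ∀ (k : Nat), k ≤ N →
    ((pvReach l N).getD 0 []).getD k false = reachF l (k : Int) := by
  intro l
  induction l with
  | nil =>
    intro _ k hk
    have : (pvReach ([] : List Int) N).getD 0 [] = pvLastRow N := rfl
    rw [this]
    cases k with
    | zero => simp [pvLastRow, reachF]
    | succ k =>
      have h1 : (pvLastRow N).getD (k + 1) false = false := by
        simp [pvLastRow, List.getD]
      rw [h1]
      simp [reachF]
      omega
  | cons ci l' ih =>
    intro hpos k hk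
    have hci : 0 ≤ ci := hpos ci (by simp)
    have hpos' : ∀ x ∈ l', 0 ≤ x := fun x hx => hpos x (by simp [hx])
    have h0 : (pvReach (ci :: l') N).getD 0 [] = pvRow ci ((pvReach l' N).headD []) N := rfl
    rw [h0, pvReach_headD, pvRow, PySem.List.getD_map_range _ _ _ _ (by omega)]
    by_cases hle : ci ≤ (k : Int)
    · have htn : (((k : Int) - ci).toNat : Int) = (k : Int) - ci := by omega
      have htle : ((k : Int) - ci).toNat ≤ N := by omega
      rw [ih hpos' k hk, ih hpos' _ htle, htn]
      simp [reachF, hle]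
    · have h2 : decide (ci ≤ (k : Int)) = false := by simpa using hle
      rw [ih hpos' k hk]
      simp [reachF, h2]

lemma reach_rowAt (N : Nat) : ∀ (j : Nat) (l : List Int), j ≤ l.length →
    (pvReach l N).getD j [] = (pvReach (l.drop j) N).getD 0 [] := by
  intro j
  induction j with
  | zero => intro l _; rfl
  | succ j ih =>
    intro l hl
    cases l with
    | nil => simp at hl
    | cons ci l' =>
      have : pvReach (ci :: l') N = pvRow ci ((pvReach l' N).headD []) N :: pvReach l' N := rfl
      rw [this, List.getD_cons_succ, ih l' (by simpa using hl)]
      rfl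

lemma loopA (groups : List (List Int)) (sel : PySem.Set Nat) :
    ∀ (gs : List (List Int)) (i : Nat) (r : Int) (ab : List Int × List Int),
    gs = groups.drop i →
    reachF (gs.map (fun g => (g.length : Int))) r = true →
    (∀ j, i ≤ j → (j ∈ sel ↔ j ∈ pathT (gs.map (fun g => (g.length : Int))) i r)) →
    (List.range' i gs.length).foldl (fun ab i =>
      if PySem.Set.contains sel i then (ab.1 ++ groups.getD i [], ab.2)
      else (ab.1, ab.2 ++ groups.getD i [])) ab = pvAsm gs r ab := by
  intro gs
  induction gs with
  | nil => intro i r ab _ _ _; simp [pvAsm]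
  | cons g gs' ih =>
    intro i r ab hgs hreach hmem
    have hg : groups.getD i [] = g := getD_drop [] groups i g gs' hgs.symm
    have hgs' : gs' = groups.drop (i + 1) := by
      rw [← List.tail_drop, ← hgs]; rfl
    rw [List.length_cons, List.range'_succ, List.foldl_cons]
    by_cases hskip : reachF (gs'.map (fun g => (g.length : Int))) r = true
    · have hnotin : i ∉ sel := by
        intro hin
        have := (hmem i le_rfl).mp hin
        simp [pathT, hskip] at this
        have := pathT_ge _ _ _ _ this
        omega
      have hcont : PySem.Set.contains sel i = false := by
        rw [Bool.eq_false_iff]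
        intro hc
        exact hnotin ((PySem.Set.contains_iff sel i).mp hc)
      rw [hcont]
      simp only [Bool.false_eq_true, if_false]
      have hpa : pvAsm (g :: gs') r ab = pvAsm gs' r (ab.1, ab.2 ++ groups.getD i []) := by
        rw [hg]; simp [pvAsm, hskip]
      rw [hpa]
      refine ih (i + 1) r _ hgs' hskip ?_
      intro j hj
      rw [hmem j (by omega)]
      simp [pathT, hskip]
    · have hreach' : decide ((g.length : Int) ≤ r) = true ∧
          reachF (gs'.map (fun g => (g.length : Int))) (r - (g.length : Int)) = true := by
        simp only [List.map_cons, reachF, hskip, Bool.false_or, Bool.and_eq_true] at hreach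
        exact hreach
      have hpath : pathT ((g :: gs').map (fun g => (g.length : Int))) i r
          = i :: pathT (gs'.map (fun g => (g.length : Int))) (i + 1) (r - (g.length : Int)) := by
        simp [pathT, hskip]
      have hin : i ∈ sel := by
        rw [hmem i le_rfl, hpath]; simp
      have hcont : PySem.Set.contains sel i = true := (PySem.Set.contains_iff sel i).mpr hin
      rw [hcont]
      simp only [if_true]
      have hpa : pvAsm (g :: gs') r ab
          = pvAsm gs' (r - (g.length : Int)) (ab.1 ++ groups.getD i [], ab.2) := by
        rw [hg]; simp [pvAsm, hskip]
      rw [hpa]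
      refine ih (i + 1) (r - (g.length : Int)) _ hgs' hreach'.2 ?_
      intro j hj
      rw [hmem j (by omega), hpath]
      simp only [List.mem_cons]
      constructor
      · rintro (h | h)
        · omega
        · exact h
      · intro h; exact Or.inr h

lemma loopB (groups : List (List Int)) (N : Nat) :
    ∀ (gs : List (List Int)) (i : Nat) (r : Int) (ab : List Int × List Int),
    gs = groups.drop i →
    reachF (gs.map (fun g => (g.length : Int))) r = true →
    0 ≤ r → r ≤ (N : Int) →
    ((List.range' i gs.length).foldl (fun (st : (List Int × List Int) × Int) i =>
        if ((pvReach (groups.map (fun g => (g.length : Int))) N).getD (i + 1) []).getD st.2.toNat false then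
          ((st.1.1, st.1.2 ++ groups.getD i []), st.2)
        else ((st.1.1 ++ groups.getD i [], st.1.2), st.2 - (groups.map (fun g => (g.length : Int))).getD i 0))
      (ab, r)).1 = pvAsm gs r ab := by
  intro gs
  induction gs with
  | nil => intro i r ab _ _ _ _; simp [pvAsm]
  | cons g gs' ih =>
    intro i r ab hgs hreach hr0 hrN
    have hg : groups.getD i [] = g := getD_drop [] groups i g gs' hgs.symm
    have hgs' : gs' = groups.drop (i + 1) := by
      rw [← List.tail_drop, ← hgs]; rfl
    have hlen : i < groups.length := by
      by_contra h
      rw [List.drop_eq_nil_of_le (by omega)] at hgs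
      simp at hgs
    have hdropmap : (groups.map (fun g => (g.length : Int))).drop (i + 1)
        = gs'.map (fun g => (g.length : Int)) := by
      rw [← List.map_drop, ← hgs']
    have hcg : (groups.map (fun g => (g.length : Int))).getD i 0 = (g.length : Int) := by
      refine getD_drop 0 _ i _ (gs'.map (fun g => (g.length : Int))) ?_
      rw [← List.map_drop, ← hgs]
      rfl
    have hpos : ∀ x ∈ gs'.map (fun g => (g.length : Int)), 0 ≤ x := by
      intro x hx
      simp only [List.mem_map] at hx
      obtain ⟨y, _, hy⟩ := hx
      omega
    have hrowAt : (pvReach (groups.map (fun g => (g.length : Int))) N).getD (i + 1) []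
        = (pvReach (gs'.map (fun g => (g.length : Int))) N).getD 0 [] := by
      rw [reach_rowAt N (i + 1) _ (by simpa using hlen), hdropmap]
    have hlook : ((pvReach (groups.map (fun g => (g.length : Int))) N).getD (i + 1) []).getD r.toNat false
        = reachF (gs'.map (fun g => (g.length : Int))) r := by
      rw [hrowAt, row_lookup N _ hpos r.toNat (by omega)]
      congr 1
      omega
    rw [List.length_cons, List.range'_succ, List.foldl_cons]
    by_cases hskip : reachF (gs'.map (fun g => (g.length : Int))) r = true
    · rw [hlook, hskip]
      simp only [if_true]
      have hpa : pvAsm (g :: gs') r ab = pvAsm gs' r (ab.1, ab.2 ++ groups.getD i []) := by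
        rw [hg]; simp [pvAsm, hskip]
      rw [hpa]
      exact ih (i + 1) r _ hgs' hskip hr0 hrN
    · have hreach' : (g.length : Int) ≤ r ∧
          reachF (gs'.map (fun g => (g.length : Int))) (r - (g.length : Int)) = true := by
        simp only [List.map_cons, reachF, hskip, Bool.false_or, Bool.and_eq_true,
          decide_eq_true_eq] at hreach
        exact hreach
      rw [hlook]
      simp only [hskip, Bool.false_eq_true, if_false, hcg]
      have hpa : pvAsm (g :: gs') r ab
          = pvAsm gs' (r - (g.length : Int)) (ab.1 ++ groups.getD i [], ab.2) := by
        rw [hg]; simp [pvAsm, hskip]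
      rw [hpa]
      exact ih (i + 1) (r - (g.length : Int)) _ hgs' hreach'.2 (by omega) (by omega)

-- ===== VERDICT (by name: the statement is the Claim_ definition above) =====
theorem answer_spec : Claim_equal_answer := by
  unfold Claim_equal_answer
  intro n c _hdom _hpre
  unfold Spec_answer
  simp only [answer, answer_alt]
  obtain ⟨htop, hmem⟩ := dfs_top ((pvMkGroups n c).map (fun g => (g.length : Int))) n
  have hpos : ∀ x ∈ (pvMkGroups n c).map (fun g => (g.length : Int)), 0 ≤ x := by
    intro x hx
    simp only [List.mem_map] at hx
    obtain ⟨y, -, hy⟩ := hx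
    omega
  cases hb : reachF ((pvMkGroups n c).map (fun g => (g.length : Int))) n with
  | false =>
    rw [hb] at htop
    by_cases hn : n < 0
    · rw [htop, if_pos hn]
      simp only [Bool.false_eq_true, if_false]
    · have hlk : ((pvReach ((pvMkGroups n c).map (fun g => (g.length : Int))) n.toNat).getD 0
          []).getD n.toNat false = false := by
        rw [row_lookup n.toNat _ hpos n.toNat le_rfl, Int.toNat_of_nonneg (by omega)]
        exact hb
      rw [htop, if_neg hn, hlk]
      simp only [Bool.false_eq_true, if_false]
  | true =>
    rw [hb] at htop
    have hn : ¬ n < 0 := by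
      intro hn
      rw [reachF_neg _ hpos n hn] at hb
      exact Bool.noConfusion hb
    have hlk : ((pvReach ((pvMkGroups n c).map (fun g => (g.length : Int))) n.toNat).getD 0
        []).getD n.toNat false = true := by
      rw [row_lookup n.toNat _ hpos n.toNat le_rfl, Int.toNat_of_nonneg (by omega)]
      exact hb
    have hA := loopA (pvMkGroups n c)
      (pvDfs ((pvMkGroups n c).map (fun g => (g.length : Int))) 0 n PySem.Dict.empty
        PySem.Set.empty).2.2
      (pvMkGroups n c) 0 n ([], []) (by simp) hb
      (by
        intro j _
        rw [hmem j, hb]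
        simp)
    have hB := loopB (pvMkGroups n c) n.toNat (pvMkGroups n c) 0 n ([], []) (by simp) hb
      (by omega) (by rw [Int.toNat_of_nonneg (by omega)])
    rw [htop, if_neg hn, hlk]
    simp only [List.length_map, List.range_eq_range']
    rw [hA, hB]
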